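-- pv_equiv track=rewrite | github.com/HyVar/gentoo_to_mspl | guest/hyvar/configuration.py | use_configuration_create_from_uses_list
-- ===== SOURCE A (Python) =====
-- def use_configuration_create(positive=[], negative=[]):
-- 	return ( set(positive), set(negative) )
--
-- def use_configuration_add(use_configuration, use):
-- 	use_configuration[0].add(use)
-- 	use_configuration[1].discard(use)
--
-- def use_configuration_remove(use_configuration, use):
-- 	use_configuration[0].discard(use)
-- 	use_configuration[1].add(use)
--
-- def use_configuration_create_from_uses_list(uses_list):
-- 	res = use_configuration_create()
-- 	for use in uses_list:
-- 		if use[0] == "-":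
-- 			use_configuration_remove(res, use[1:])
-- 		else:
-- 			use_configuration_add(res, use)
-- 	return res
-- ===== SOURCE B (Python) =====
-- # Reverse-scan re-implementation: parse each token into (base, sign), scan the
-- # pairs once from the right collecting the tokens not cancelled by a later
-- # opposite-sign token, then dedup forward.  (Returns sets, like the original.)
-- def use_configuration_create_from_uses_list(uses_list):
--     pairs = [(use[1:], False) if use[0] == "-" else (use, True) for use in uses_list]
--     later_pos, later_neg = set(), set()
--     pos_rev, neg_rev = [], []
--     for base, sign in reversed(pairs):
--         if sign:
--             if base not in later_neg:
--                 pos_rev.append(base)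
--             later_pos.add(base)
--         else:
--             if base not in later_pos:
--                 neg_rev.append(base)
--             later_neg.add(base)
--     return (set(reversed(pos_rev)), set(reversed(neg_rev)))
-- ===== Notes on version B (the rewrite author's own statement) =====
-- stated objective: alternative
-- what changed: Replaces the forward two-set add/discard maintenance with a parse pass into (base, sign) pairs, a single reverse scan that keeps each token not cancelled by a later opposite-sign token, and a final forward dedup of the survivors.
import Mathlib
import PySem

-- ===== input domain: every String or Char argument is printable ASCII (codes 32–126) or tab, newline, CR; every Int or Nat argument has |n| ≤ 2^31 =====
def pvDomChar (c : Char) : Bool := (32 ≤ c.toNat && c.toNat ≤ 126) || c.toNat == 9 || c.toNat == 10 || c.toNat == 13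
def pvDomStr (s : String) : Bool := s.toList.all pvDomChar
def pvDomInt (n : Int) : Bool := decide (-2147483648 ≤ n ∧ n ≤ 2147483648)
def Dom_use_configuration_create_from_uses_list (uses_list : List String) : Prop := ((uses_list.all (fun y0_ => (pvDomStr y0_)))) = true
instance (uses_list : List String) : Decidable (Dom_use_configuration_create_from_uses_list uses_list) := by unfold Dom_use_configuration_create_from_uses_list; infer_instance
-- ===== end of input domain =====

-- B replaces the two-set add/discard maintenance by a parse pass, a single reverse
-- scan collecting tokens not cancelled by a later opposite-sign token, and a
-- forward dedup (alternative algorithm, same cost).  Python A/B return sets;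
-- equal element lists are proved here.

-- ===== PORT A =====
def use_configuration_create (positive : List String) (negative : List String) :
    PySem.Set String × PySem.Set String :=
  (PySem.Set.ofList positive, PySem.Set.ofList negative)

def use_configuration_add (uc : PySem.Set String × PySem.Set String) (use : String) :
    PySem.Set String × PySem.Set String :=
  (PySem.Set.add uc.1 use, PySem.Set.discard uc.2 use)

def use_configuration_remove (uc : PySem.Set String × PySem.Set String) (use : String) :
    PySem.Set String × PySem.Set String :=
  (PySem.Set.discard uc.1 use, PySem.Set.add uc.2 use)

def use_configuration_create_from_uses_list (uses_list : List String) : List String × List String :=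
  uses_list.foldl
    (fun res use =>
      if PySem.Str.pyGet? use 0 = some '-' then
        use_configuration_remove res (PySem.Str.slice use (some 1) none)
      else
        use_configuration_add res use)
    (use_configuration_create [] [])

-- ===== PORT B =====
-- pairs = [(use[1:], False) if use[0] == "-" else (use, True) for use in uses_list]
def pvParse (use : String) : String × Bool :=
  if PySem.Str.pyGet? use 0 = some '-' then (PySem.Str.slice use (some 1) none, false)
  else (use, true)

-- state: ((later_pos, later_neg), (pos_rev, neg_rev))
def pvScanStep (st : (PySem.Set String × PySem.Set String) × (List String × List String))
    (p : String × Bool) : (PySem.Set String × PySem.Set String) × (List String × List String) :=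
  if p.2 then
    ((PySem.Set.add st.1.1 p.1, st.1.2),
     ((if PySem.Set.contains st.1.2 p.1 then st.2.1 else st.2.1 ++ [p.1]), st.2.2))
  else
    ((st.1.1, PySem.Set.add st.1.2 p.1),
     (st.2.1, (if PySem.Set.contains st.1.1 p.1 then st.2.2 else st.2.2 ++ [p.1])))

def use_configuration_create_from_uses_list_alt (uses_list : List String) : List String × List String :=
  let pairs := uses_list.map pvParse
  let st := pairs.reverse.foldl pvScanStep (([], []), ([], []))
  (PySem.Set.ofList st.2.1.reverse, PySem.Set.ofList st.2.2.reverse)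

-- ===== PRECONDITION & SPEC =====
-- Pre_ excludes lists containing the empty string: Python A (and B) raise IndexError on use[0] there.
def Pre_use_configuration_create_from_uses_list (uses_list : List String) : Prop :=
  ∀ u ∈ uses_list, u ≠ ""
instance (uses_list : List String) : Decidable (Pre_use_configuration_create_from_uses_list uses_list) := by
  unfold Pre_use_configuration_create_from_uses_list; infer_instance

def pvWitness_use_configuration_create_from_uses_list : List String := ["a", "-b", "a", "-a"]

def Spec_use_configuration_create_from_uses_list (uses_list : List String) (out : List String × List String) : Prop := out = use_configuration_create_from_uses_list_alt uses_list
instance (uses_list : List String) (out : List String × List String) : Decidable (Spec_use_configuration_create_from_uses_list uses_list out) := by unfold Spec_use_configuration_create_from_uses_list; infer_instance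

-- ===== CLAIM (what is proved, stated in full; the proofs are below) =====
def Claim_equal_use_configuration_create_from_uses_list : Prop := ∀ (uses_list : List String), Dom_use_configuration_create_from_uses_list uses_list → Pre_use_configuration_create_from_uses_list uses_list → Spec_use_configuration_create_from_uses_list uses_list (use_configuration_create_from_uses_list uses_list)

-- ===== LEMMAS AND PROOFS =====

-- Common characterisation over the parsed pair list, processed left to right:
-- c.1 / c.2 are the positive / negative tokens not (yet) cancelled, in insertion order.
def pvCharStep (c : List String × List String) (p : String × Bool) : List String × List String :=
  if p.2 then (c.1 ++ [p.1], c.2.filter (fun x => !(x == p.1)))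
  else (c.1.filter (fun x => !(x == p.1)), c.2 ++ [p.1])

-- positive / negative bases occurring in a pair list
def pvPosB (ps : List (String × Bool)) : List String := (ps.filter (fun p => p.2)).map (fun p => p.1)
def pvNegB (ps : List (String × Bool)) : List String := (ps.filter (fun p => !p.2)).map (fun p => p.1)

-- the tokens not cancelled by a later opposite-sign token, forward order
def pvKept : List (String × Bool) → List String × List String
  | [] => ([], [])
  | p :: t =>
    let k := pvKept t
    if p.2 then ((if (pvNegB t).contains p.1 then k.1 else p.1 :: k.1), k.2)
    else (k.1, (if (pvPosB t).contains p.1 then k.2 else p.1 :: k.2))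

-- A's loop body over a parsed pair
def pvPairStep (res : PySem.Set String × PySem.Set String) (p : String × Bool) :
    PySem.Set String × PySem.Set String :=
  if p.2 then use_configuration_add res p.1 else use_configuration_remove res p.1

theorem pvOfList_append_singleton (xs : List String) (b : String) :
    PySem.Set.ofList (xs ++ [b]) = PySem.Set.add (PySem.Set.ofList xs) b := by
  simp [PySem.Set.ofList_eq_foldl, List.foldl_append]

theorem pvFilter_add_pos (q : String → Bool) (s : PySem.Set String) (a : String) (h : q a = true) :
    (PySem.Set.add s a).filter q = PySem.Set.add (s.filter q) a := by
  by_cases ha : a ∈ s <;>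
    simp [PySem.Set.add, PySem.Set.contains, List.filter_append, h, ha, List.mem_filter]

theorem pvFilter_add_neg (q : String → Bool) (s : PySem.Set String) (a : String) (h : q a = false) :
    (PySem.Set.add s a).filter q = s.filter q := by
  by_cases ha : a ∈ s <;>
    simp [PySem.Set.add, PySem.Set.contains, List.filter_append, h, ha]

theorem pvFilter_ofList (q : String → Bool) (xs : List String) :
    (PySem.Set.ofList xs).filter q = PySem.Set.ofList (xs.filter q) := by
  have main : ∀ (xs : List String) (s : PySem.Set String),
      (List.foldl PySem.Set.add s xs).filter q = List.foldl PySem.Set.add (s.filter q) (xs.filter q) := by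
    intro xs
    induction xs with
    | nil => intro s; simp
    | cons x t ih =>
      intro s
      by_cases h : q x = true
      · simp only [List.foldl_cons, List.filter_cons, h, if_pos trivial, ih,
          pvFilter_add_pos q s x h]
      · have h' : q x = false := by simpa using h
        simp only [List.foldl_cons, List.filter_cons, h', Bool.false_eq_true, if_false, ih,
          pvFilter_add_neg q s x h']
  simpa [PySem.Set.ofList_eq_foldl] using main xs []

theorem pvDiscard_ofList (xs : List String) (b : String) :
    PySem.Set.discard (PySem.Set.ofList xs) b = PySem.Set.ofList (xs.filter (fun x => !(x == b))) := by
  simpa [PySem.Set.discard] using pvFilter_ofList (fun x => !(x == b)) xs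

-- A's fold tracks pvCharStep through Set.ofList
theorem pvA_char (ps : List (String × Bool)) (c1 c2 : List String) :
    ps.foldl pvPairStep (PySem.Set.ofList c1, PySem.Set.ofList c2) =
      (PySem.Set.ofList (ps.foldl pvCharStep (c1, c2)).1, PySem.Set.ofList (ps.foldl pvCharStep (c1, c2)).2) := by
  induction ps generalizing c1 c2 with
  | nil => rfl
  | cons p t ih =>
    simp only [List.foldl_cons]
    have hstep : pvPairStep (PySem.Set.ofList c1, PySem.Set.ofList c2) p
        = (PySem.Set.ofList (pvCharStep (c1, c2) p).1, PySem.Set.ofList (pvCharStep (c1, c2) p).2) := by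
      by_cases hp : p.2 = true
      · simp [pvPairStep, pvCharStep, hp, use_configuration_add, pvOfList_append_singleton,
          pvDiscard_ofList]
      · simp [pvPairStep, pvCharStep, hp, use_configuration_remove, pvOfList_append_singleton,
          pvDiscard_ofList]
    rw [hstep]
    exact ih (pvCharStep (c1, c2) p).1 (pvCharStep (c1, c2) p).2

-- the char fold from any start equals "survivors of the start" ++ pvKept
theorem pvChar_kept (ps : List (String × Bool)) (c : List String × List String) :
    ps.foldl pvCharStep c =
      (c.1.filter (fun x => !((pvNegB ps).contains x)) ++ (pvKept ps).1,
       c.2.filter (fun x => !((pvPosB ps).contains x)) ++ (pvKept ps).2) := by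
  induction ps generalizing c with
  | nil => simp [pvKept, pvNegB, pvPosB]
  | cons p t ih =>
    obtain ⟨b, s⟩ := p
    obtain ⟨c1, c2⟩ := c
    cases s
    · -- negative token
      have hc : pvCharStep (c1, c2) (b, false)
          = (c1.filter (fun x => !(x == b)), c2 ++ [b]) := by simp [pvCharStep]
      simp only [List.foldl_cons, hc, ih]
      simp only [pvNegB, pvPosB, pvKept, List.filter_cons]
      simp only [List.filter_filter, List.filter_append]
      by_cases hb : (b, true) ∈ t
      · simp [hb, Bool.beq_eq_decide_eq, Bool.and_comm]
      · simp [hb, Bool.beq_eq_decide_eq, Bool.and_comm]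
    · -- positive token
      have hc : pvCharStep (c1, c2) (b, true)
          = (c1 ++ [b], c2.filter (fun x => !(x == b))) := by simp [pvCharStep]
      simp only [List.foldl_cons, hc, ih]
      simp only [pvNegB, pvPosB, pvKept, List.filter_cons]
      simp only [List.filter_filter, List.filter_append]
      by_cases hb : (b, false) ∈ t
      · simp [hb, Bool.beq_eq_decide_eq, Bool.and_comm]
      · simp [hb, Bool.beq_eq_decide_eq, Bool.and_comm]

-- B's reverse scan computes pvKept reversed
theorem pvB_scan (ps : List (String × Bool)) :
    ps.reverse.foldl pvScanStep (([], []), ([], [])) =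
      ((PySem.Set.ofList (pvPosB ps).reverse, PySem.Set.ofList (pvNegB ps).reverse),
       ((pvKept ps).1.reverse, (pvKept ps).2.reverse)) := by
  induction ps with
  | nil => rfl
  | cons p t ih =>
    obtain ⟨b, s⟩ := p
    simp only [List.reverse_cons, List.foldl_append, List.foldl_cons, List.foldl_nil, ih]
    cases s
    · by_cases hm : (b, true) ∈ t
      · simp [pvScanStep, pvKept, pvPosB, pvNegB, PySem.Set.contains,
          pvOfList_append_singleton, PySem.Set.mem_ofList, List.mem_reverse, hm]
      · simp [pvScanStep, pvKept, pvPosB, pvNegB, PySem.Set.contains,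
          pvOfList_append_singleton, PySem.Set.mem_ofList, List.mem_reverse, hm]
    · by_cases hm : (b, false) ∈ t
      · simp [pvScanStep, pvKept, pvPosB, pvNegB, PySem.Set.contains,
          pvOfList_append_singleton, PySem.Set.mem_ofList, List.mem_reverse, hm]
      · simp [pvScanStep, pvKept, pvPosB, pvNegB, PySem.Set.contains,
          pvOfList_append_singleton, PySem.Set.mem_ofList, List.mem_reverse, hm]

theorem pvA_eq (uses_list : List String) :
    use_configuration_create_from_uses_list uses_list =
      ((uses_list.map pvParse).foldl pvPairStep (PySem.Set.ofList [], PySem.Set.ofList [])) := by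
  unfold use_configuration_create_from_uses_list use_configuration_create
  rw [List.foldl_map]
  apply PySem.List.foldl_congr_mem
  intro acc use _
  by_cases h : PySem.List.pyGet? use.toList 0 = some '-'
  · simp [pvParse, pvPairStep, h]
  · simp [pvParse, pvPairStep, h]

theorem use_configuration_create_from_uses_list_spec : Claim_equal_use_configuration_create_from_uses_list := by
  intro uses_list _ _
  unfold Spec_use_configuration_create_from_uses_list
  rw [pvA_eq, pvA_char _ [] [], pvChar_kept]
  simp only [use_configuration_create_from_uses_list_alt, pvB_scan, List.reverse_reverse,
    List.filter_nil, List.nil_append]
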